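-- pv_equiv track=rewrite | github.com/ThomasMcVay/MediaApp | MediaAppNodes/NodeConstructor.py | coordListRect
-- ===== SOURCE A (Python) =====
-- def coordListRect(coordList):
--     #Takes: coordList = [[0,0],[70,0],[74,8]]
--     #Returns: rectLowHigh = [[0,0],[74,8]]
--     dimensions = len(coordList[0])
--     lowValues = []
--     highValues = []
--     for a in range(dimensions):
--         lowValues.append(None)
--         highValues.append(None)
--         for b in coordList:
--             if lowValues[a] == None or b[a] < lowValues[a]:
--                 lowValues[a] = b[a]
--             if highValues[a] == None or b[a] > highValues[a]:
--                 highValues[a] = b[a]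
--     return [lowValues, highValues]
-- ===== SOURCE B (Python) =====
-- def coordListRect(coordList):
--     # Incremental bounding-box merge: seed the box with the first point, then
--     # fold every further point into the running (low, high) box componentwise.
--     low = list(coordList[0])
--     high = list(coordList[0])
--     for p in coordList[1:]:
--         low = [min(l, x) for l, x in zip(low, p)]
--         high = [max(h, x) for h, x in zip(high, p)]
--     return [low, high]
-- ===== Notes on version B (the rewrite author's own statement) =====
-- stated objective: alternative
-- what changed: Replaces A's dimension-major nested loop with None-sentinel per-dimension state by a single row-major fold that seeds the box from the first point and merges each later point into the whole (low, high) vectors componentwise.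
-- outside the precondition, e.g. on coordListRect([]): A raises IndexError, B raises IndexError; on coordListRect([[1, 2], [3]]): A raises IndexError, B returns [[1], [3]]
import Mathlib
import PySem

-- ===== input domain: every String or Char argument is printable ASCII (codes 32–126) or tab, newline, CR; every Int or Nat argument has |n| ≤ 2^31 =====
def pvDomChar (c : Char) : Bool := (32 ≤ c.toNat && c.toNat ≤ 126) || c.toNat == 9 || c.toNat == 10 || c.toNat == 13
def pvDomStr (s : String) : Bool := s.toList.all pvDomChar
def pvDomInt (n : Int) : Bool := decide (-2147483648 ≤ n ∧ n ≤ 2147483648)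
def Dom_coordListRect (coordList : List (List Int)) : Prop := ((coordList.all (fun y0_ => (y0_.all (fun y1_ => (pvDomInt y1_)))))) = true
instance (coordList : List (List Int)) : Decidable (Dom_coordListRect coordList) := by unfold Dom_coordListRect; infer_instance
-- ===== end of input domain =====

-- B replaces A's dimension-major nested loop (Option-sentinel state per dimension) by a
-- single row-major fold merging each point into a running (low, high) box (alternative, same cost).

-- ===== PORT A =====
-- Literal port: for each dimension a, the inner loop over coordList carries the
-- (lowValues[a], highValues[a]) state, starting at None (= none); b[a] is
-- PySem.List.pyGetD (in range on every input Pre_ admits).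
def coordListRect (coordList : List (List Int)) : List (List Int) :=
  let dimensions := (coordList.headD []).length   -- len(coordList[0]); raises outside Pre_
  let pairs := (List.range dimensions).map (fun (a : Nat) =>
    coordList.foldl (fun (lh : Option Int × Option Int) b =>
      let v := PySem.List.pyGetD b (a : Int) 0
      (match lh.1 with | none => some v | some l => if v < l then some v else some l,
       match lh.2 with | none => some v | some h => if v > h then some v else some h))
      (none, none))
  [pairs.map (fun p => p.1.getD 0), pairs.map (fun p => p.2.getD 0)]

-- ===== PORT B =====
-- low = high = list(coordList[0]) (headD: coordList[0] raises outside Pre_);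
-- coordList[1:] = drop 1 (exact for a nonnegative start); each comprehension
-- '[min(l, x) for l, x in zip(acc, p)]' is (acc.zip p).map.
def coordListRect_alt (coordList : List (List Int)) : List (List Int) :=
  let first := coordList.headD []
  let res := (coordList.drop 1).foldl
    (fun (lh : List Int × List Int) p =>
      ((lh.1.zip p).map (fun q => min q.1 q.2),
       (lh.2.zip p).map (fun q => max q.1 q.2)))
    (first, first)
  [res.1, res.2]

-- ===== PRECONDITION & SPEC =====
-- A raises IndexError on [] and whenever some row is shorter than the first row.
def Pre_coordListRect (coordList : List (List Int)) : Prop :=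
  coordList ≠ [] ∧ ∀ r ∈ coordList, (coordList.headD []).length ≤ r.length
instance (coordList : List (List Int)) : Decidable (Pre_coordListRect coordList) := by
  unfold Pre_coordListRect; infer_instance
def pvWitness_coordListRect : List (List Int) := [[0,0],[70,0],[74,8]]

def Spec_coordListRect (coordList : List (List Int)) (out : List (List Int)) : Prop := out = coordListRect_alt coordList
instance (coordList : List (List Int)) (out : List (List Int)) : Decidable (Spec_coordListRect coordList out) := by unfold Spec_coordListRect; infer_instance

-- ===== CLAIM (what is proved, stated in full; the proofs are below) =====
def Claim_equal_coordListRect : Prop := ∀ (coordList : List (List Int)), Dom_coordListRect coordList → Pre_coordListRect coordList → Spec_coordListRect coordList (coordListRect coordList)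

-- ===== LEMMAS AND PROOFS =====

-- A's inner loop, once both sentinels are set, is the running min/max fold
theorem pv_fold_someD (a : Nat) (vs : List (List Int)) (l h : Int) :
    vs.foldl (fun (lh : Option Int × Option Int) b =>
      (match lh.1 with | none => some (b.getD a 0) | some l => if b.getD a 0 < l then some (b.getD a 0) else some l,
       match lh.2 with | none => some (b.getD a 0) | some h => if b.getD a 0 > h then some (b.getD a 0) else some h))
      (some l, some h)
    = (some (vs.foldl (fun x y => min x (y.getD a 0)) l),
       some (vs.foldl (fun x y => max x (y.getD a 0)) h)) := by
  induction vs generalizing l h with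
  | nil => rfl
  | cons b vs ih =>
    simp only [List.foldl_cons]
    have hmin : (if b.getD a 0 < l then some (b.getD a 0) else some l) = some (min l (b.getD a 0)) := by
      rcases le_or_gt l (b.getD a 0) with hc | hc
      · rw [if_neg (not_lt.mpr hc), min_eq_left hc]
      · rw [if_pos hc, min_eq_right hc.le]
    have hmax : (if b.getD a 0 > h then some (b.getD a 0) else some h) = some (max h (b.getD a 0)) := by
      rcases le_or_gt (b.getD a 0) h with hc | hc
      · rw [if_neg (not_lt.mpr hc), max_eq_left hc]
      · rw [if_pos hc, max_eq_right hc.le]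
    simp only [hmin, hmax, ih]

-- B's pair fold splits into two independent list folds
theorem pv_fold_pair (rs : List (List Int)) (low high : List Int) :
    rs.foldl (fun (lh : List Int × List Int) p =>
      ((lh.1.zip p).map (fun q => min q.1 q.2),
       (lh.2.zip p).map (fun q => max q.1 q.2))) (low, high)
    = (rs.foldl (fun acc p => (acc.zip p).map (fun q => min q.1 q.2)) low,
       rs.foldl (fun acc p => (acc.zip p).map (fun q => max q.1 q.2)) high) := by
  induction rs generalizing low high with
  | nil => rfl
  | cons p rs ih => simp only [List.foldl_cons, ih]

-- one componentwise merge step, read off at index a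
theorem pv_zip_getD (op : Int → Int → Int) (low p : List Int) (a : Nat)
    (ha : a < low.length) (hp : low.length ≤ p.length) :
    ((low.zip p).map (fun q => op q.1 q.2)).getD a 0 = op (low.getD a 0) (p.getD a 0) := by
  have hl : ((low.zip p).map (fun q => op q.1 q.2)).length = low.length := by
    simp [List.length_zip, Nat.min_eq_left hp]
  have ha2 : a < ((low.zip p).map (fun q => op q.1 q.2)).length := by omega
  have hap : a < p.length := by omega
  rw [List.getD_eq_getElem _ _ ha2, List.getD_eq_getElem _ _ ha, List.getD_eq_getElem _ _ hap]
  simp [List.getElem_zip]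

-- B's componentwise fold equals the per-index scalar fold, for any binary op
theorem pv_fold_comp (op : Int → Int → Int) (rs : List (List Int)) (low : List Int)
    (h : ∀ r ∈ rs, low.length ≤ r.length) :
    rs.foldl (fun acc p => (acc.zip p).map (fun q => op q.1 q.2)) low
    = (List.range low.length).map (fun a => rs.foldl (fun x y => op x (y.getD a 0)) (low.getD a 0)) := by
  induction rs generalizing low with
  | nil =>
    apply List.ext_getElem
    · simp
    · intro a h1 h2
      simp only [List.foldl_nil, List.getElem_map, List.getElem_range]
      rw [List.getD_eq_getElem _ _ (by simpa using h1)]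
      rfl
  | cons p rs ih =>
    have hp : low.length ≤ p.length := h p (by simp)
    have hlen : ((low.zip p).map (fun q => op q.1 q.2)).length = low.length := by
      simp [List.length_zip, Nat.min_eq_left hp]
    simp only [List.foldl_cons]
    rw [ih _ (fun r hr => by rw [hlen]; exact h r (List.mem_cons_of_mem _ hr)), hlen]
    apply List.map_congr_left
    intro a ha
    rw [pv_zip_getD op low p a (List.mem_range.mp ha) hp]

theorem coordListRect_spec : Claim_equal_coordListRect := by
  intro coordList _ hpre
  obtain ⟨hne, hlen⟩ := hpre
  obtain ⟨r, rs, rfl⟩ := List.exists_cons_of_ne_nil hne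
  unfold Spec_coordListRect coordListRect coordListRect_alt
  simp only [List.headD_cons, List.drop_one, List.tail_cons]
  rw [pv_fold_pair]
  have hr : ∀ t ∈ rs, r.length ≤ t.length := fun t ht => by
    simpa using hlen t (List.mem_cons_of_mem _ ht)
  rw [pv_fold_comp min rs r hr, pv_fold_comp max rs r hr]
  simp only [PySem.List.pyGetD_natCast, List.foldl_cons, List.map_map, List.cons.injEq, and_true]
  constructor <;>
  · apply List.map_congr_left
    intro a _
    simp only [Function.comp]
    rw [pv_fold_someD]
    rfl
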